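-- pv_equiv track=rewrite | github.com/kabhi99/System-Design | format_txt_to_md.py | normalize_code_blocks
-- ===== SOURCE A (Python) =====
-- def find_border_tail(line):
--     """Scan from right to find where the nested border tail starts.
--
--     Border tail = the rightmost sequence of border chars (| or +)
--     each separated by 1-4 spaces.  E.g. '|  |  |' or '+  |' or '|'.
--     Returns the start position, or -1 if none found.
--     """
--     i = len(line) - 1
--     while i >= 0 and line[i] == ' ':
--         i -= 1
--     if i < 0 or line[i] not in '|+':
--         return -1
--     last_border = i
--     i -= 1
--     while i >= 0:
--         spaces = 0
--         while i >= 0 and line[i] == ' ':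
--             spaces += 1
--             i -= 1
--         if 1 <= spaces <= 4 and i >= 0 and line[i] in '|+':
--             last_border = i
--             i -= 1
--         else:
--             break
--     return last_border
--
-- def pad_block(block):
--     """Pad lines in a code block so right-side borders align consistently."""
--     non_empty = [l for l in block if l.strip()]
--     if not non_empty:
--         return block
--     max_len = max(len(l) for l in non_empty)
--     result = []
--     for l in block:
--         if not l.strip() or len(l) >= max_len:
--             result.append(l)
--             continue
--         diff = max_len - len(l)
--         stripped = l.rstrip()
--         tail_pos = find_border_tail(stripped)
--         if tail_pos > 0:
--             content = stripped[:tail_pos]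
--             tail = stripped[tail_pos:]
--             if content.endswith(('-', '=')):
--                 result.append(content + '-' * diff + tail)
--             else:
--                 result.append(content + ' ' * diff + tail)
--         elif stripped.endswith('|'):
--             result.append(stripped[:-1] + ' ' * diff + '|')
--         elif stripped.endswith('+'):
--             result.append(stripped[:-1] + '-' * diff + '+')
--         else:
--             result.append(l + ' ' * diff)
--     return result
--
-- def normalize_code_blocks(text):
--     """Find every code block and pad lines to consistent width."""
--     lines = text.split('\n')
--     out = []
--     i = 0
--     n = len(lines)
--     while i < n:
--         line = lines[i]
--         if line.strip().startswith('```'):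
--             out.append(line)
--             i += 1
--             block = []
--             while i < n and not lines[i].strip().startswith('```'):
--                 block.append(lines[i])
--                 i += 1
--             out.extend(pad_block(block))
--             if i < n:
--                 out.append(lines[i])
--                 i += 1
--         else:
--             out.append(line)
--             i += 1
--     return '\n'.join(out)
-- ===== SOURCE B (Python) =====
-- def find_border_tail(line):
--     """Forward state machine: track start of the current border chain and
--     the space gap since the last border (None = chain broken)."""
--     start, gap = -1, None
--     for i, c in enumerate(line):
--         if c in '|+':
--             if gap is None or not (1 <= gap <= 4):
--                 start = i
--             gap = 0
--         elif c == ' ':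
--             if gap is not None:
--                 gap += 1
--         else:
--             start, gap = -1, None
--     return start if gap is not None else -1
--
-- def pad_line(l, max_len):
--     if not l.strip() or len(l) >= max_len:
--         return l
--     diff = max_len - len(l)
--     stripped = l.rstrip()
--     pos = find_border_tail(stripped)
--     if pos > 0:
--         content, tail = stripped[:pos], stripped[pos:]
--         filler = '-' if content[-1] in '-=' else ' '
--         return content + filler * diff + tail
--     if stripped and stripped[-1] in '|+':
--         filler = ' ' if stripped[-1] == '|' else '-'
--         return stripped[:-1] + filler * diff + stripped[-1]
--     return l + ' ' * diff
--
-- def pad_block(block):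
--     widths = [len(l) for l in block if l.strip()]
--     if not widths:
--         return block
--     max_len = max(widths)
--     return [pad_line(l, max_len) for l in block]
--
-- def normalize_code_blocks(text):
--     """Single line-by-line pass carrying an 'inside code block' accumulator."""
--     out = []
--     block = None
--     for line in text.split('\n'):
--         if line.strip().startswith('```'):
--             if block is None:
--                 out.append(line)
--                 block = []
--             else:
--                 out.extend(pad_block(block))
--                 out.append(line)
--                 block = None
--         elif block is None:
--             out.append(line)
--         else:
--             block.append(line)
--     if block is not None:
--         out.extend(pad_block(block))
--     return '\n'.join(out)
-- ===== Notes on version B (the rewrite author's own statement) =====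
-- stated objective: alternative
-- what changed: find_border_tail's right-to-left scan with a nested space-counting loop is replaced by a single left-to-right state machine (chain start + gap since last border), the index-driven while-loop over lines by a one-pass fold carrying an 'inside code block' accumulator, and pad_block's accumulator loop by a map over a per-line helper.
import Mathlib
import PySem

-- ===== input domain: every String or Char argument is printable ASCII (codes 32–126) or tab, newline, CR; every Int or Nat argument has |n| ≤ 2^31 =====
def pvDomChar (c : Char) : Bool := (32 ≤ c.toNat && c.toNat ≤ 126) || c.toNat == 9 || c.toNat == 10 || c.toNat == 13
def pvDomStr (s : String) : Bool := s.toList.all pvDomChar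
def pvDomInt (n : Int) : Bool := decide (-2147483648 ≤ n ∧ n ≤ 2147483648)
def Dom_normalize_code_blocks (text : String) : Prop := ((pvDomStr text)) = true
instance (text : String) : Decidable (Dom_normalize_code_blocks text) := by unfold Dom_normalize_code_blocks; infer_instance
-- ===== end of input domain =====

-- B replaces A's right-to-left nested border scan by a one-pass forward state machine,
-- A's index-driven block loop by a line-by-line pass carrying an accumulator, and
-- pad_block's accumulator loop by a map over a per-line helper (objective: alternative).

-- ===== PORT A =====

-- c in '|+'
def pvIsBorder (c : Char) : Bool := c == '|' || c == '+'

-- line[i] (used only at indices that are in range in every call site)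
def pvGetc (cs : List Char) (i : Int) : Char := (PySem.List.pyGet? cs i).getD ' '

-- A's inner `while i >= 0 and line[i] == ' '` counting loop: returns (spaces, final i)
def pvCountSp (cs : List Char) (i : Int) : Nat × Int :=
  if h : 0 ≤ i ∧ pvGetc cs i = ' ' then
    ((pvCountSp cs (i - 1)).1 + 1, (pvCountSp cs (i - 1)).2)
  else (0, i)
termination_by (i + 1).toNat
decreasing_by omega

-- needed by pvFbtLoop's termination proof (and by the equivalence proofs below)
theorem pvCountSp_snd (cs : List Char) (i : Int) :
    (pvCountSp cs i).2 = i - ((pvCountSp cs i).1 : Int) := by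
  fun_induction pvCountSp cs i with
  | case1 i h ih => omega
  | case2 i h => simp

-- A's first `while i >= 0 and line[i] == ' '` (just skips)
def pvSkipSp (cs : List Char) (i : Int) : Int :=
  if h : 0 ≤ i ∧ pvGetc cs i = ' ' then pvSkipSp cs (i - 1) else i
termination_by (i + 1).toNat
decreasing_by omega

-- A's main `while i >= 0` loop of find_border_tail
def pvFbtLoop (cs : List Char) (last i : Int) : Int :=
  if h : 0 ≤ i then
    if hc : 1 ≤ (pvCountSp cs i).1 ∧ (pvCountSp cs i).1 ≤ 4 ∧ 0 ≤ (pvCountSp cs i).2 ∧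
        pvIsBorder (pvGetc cs (pvCountSp cs i).2) = true then
      pvFbtLoop cs (pvCountSp cs i).2 ((pvCountSp cs i).2 - 1)
    else last
  else last
termination_by (i + 1).toNat
decreasing_by
  have := pvCountSp_snd cs i
  omega

-- A's find_border_tail
def pvFbtA (cs : List Char) : Int :=
  let i := pvSkipSp cs ((cs.length : Int) - 1)
  if i < 0 ∨ ¬ pvIsBorder (pvGetc cs i) = true then -1
  else pvFbtLoop cs i (i - 1)

-- the body of A's `for l in block` loop in pad_block
def pvPadStepA (max_len : Nat) (result : List (List Char)) (l : List Char) : List (List Char) :=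
  if (PySem.Chars.strip l).isEmpty || decide (max_len ≤ l.length) then result ++ [l]
  else
    let diff := max_len - l.length
    let stripped := PySem.Chars.rstrip l
    let tail_pos := pvFbtA stripped
    if 0 < tail_pos then
      let content := PySem.List.slice stripped none (some tail_pos)
      let tail := PySem.List.slice stripped (some tail_pos) none
      if PySem.Chars.endswith content ['-'] || PySem.Chars.endswith content ['='] then
        result ++ [content ++ List.replicate diff '-' ++ tail]
      else
        result ++ [content ++ List.replicate diff ' ' ++ tail]
    else if PySem.Chars.endswith stripped ['|'] then
      result ++ [PySem.List.slice stripped none (some (-1)) ++ List.replicate diff ' ' ++ ['|']]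
    else if PySem.Chars.endswith stripped ['+'] then
      result ++ [PySem.List.slice stripped none (some (-1)) ++ List.replicate diff '-' ++ ['+']]
    else result ++ [l ++ List.replicate diff ' ']

-- A's pad_block
def pvPadBlockA (block : List (List Char)) : List (List Char) :=
  let non_empty := block.filter (fun l => !(PySem.Chars.strip l).isEmpty)
  if non_empty = [] then block
  else
    let max_len := ((PySem.List.max? (non_empty.map (fun l => l.length)) (fun x => x)).getD 0)
    block.foldl (pvPadStepA max_len) []

-- line.strip().startswith('```')
def pvFence (l : List Char) : Bool := PySem.Chars.startswith (PySem.Chars.strip l) ['`', '`', '`']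

-- A's `while i < n` loop: pvOuterA = scanning outside a block at index i,
-- pvInnerA = the inner `while i < n and not fence` block-collecting loop
mutual
def pvOuterA : List (List Char) → List (List Char)
  | [] => []
  | l :: rest => if pvFence l then l :: pvInnerA rest [] else l :: pvOuterA rest
termination_by l => l.length
def pvInnerA : List (List Char) → List (List Char) → List (List Char)
  | [], block => pvPadBlockA block
  | l :: rest, block =>
      if pvFence l then pvPadBlockA block ++ l :: pvOuterA rest
      else pvInnerA rest (block ++ [l])
termination_by l _ => l.length
end

def normalize_code_blocks (text : String) : String :=
  let lines := (PySem.Chars.split? text.toList ['\n']).getD []   -- separator ≠ '' : never none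
  String.ofList (PySem.Chars.join ['\n'] (pvOuterA lines))

-- ===== PORT B =====

-- the body of Source B's `for i, c in enumerate(line)` state machine
def pvFbtStep (st : Int × Option Nat) (ic : Int × Char) : Int × Option Nat :=
  if pvIsBorder ic.2 then
    (match st.2 with
     | some g => if 1 ≤ g ∧ g ≤ 4 then st.1 else ic.1
     | none => ic.1,
     some 0)
  else if ic.2 = ' ' then (st.1, st.2.map (· + 1))
  else (-1, none)

-- B's find_border_tail
def pvFbtB (cs : List Char) : Int :=
  match (PySem.List.enumerate cs 0).foldl pvFbtStep (-1, none) with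
  | (s, some _) => s
  | (_, none) => -1

-- B's pad_line
def pvPadLineB (l : List Char) (max_len : Nat) : List Char :=
  if (PySem.Chars.strip l).isEmpty || decide (max_len ≤ l.length) then l
  else
    let diff := max_len - l.length
    let stripped := PySem.Chars.rstrip l
    let pos := pvFbtB stripped
    if 0 < pos then
      let content := PySem.List.slice stripped none (some pos)
      let tail := PySem.List.slice stripped (some pos) none
      -- content[-1] : in range (content nonempty whenever pos > 0)
      let lastc := (PySem.List.pyGet? content (-1)).getD ' '
      let filler := if lastc = '-' ∨ lastc = '=' then '-' else ' '
      content ++ List.replicate diff filler ++ tail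
    else
      -- `if stripped and stripped[-1] in '|+'`
      match PySem.List.pyGet? stripped (-1) with
      | some c =>
          if pvIsBorder c then
            let filler := if c = '|' then ' ' else '-'
            PySem.List.slice stripped none (some (-1)) ++ List.replicate diff filler ++ [c]
          else l ++ List.replicate diff ' '
      | none => l ++ List.replicate diff ' '

-- B's pad_block
def pvPadBlockB (block : List (List Char)) : List (List Char) :=
  let widths := (block.filter (fun l => !(PySem.Chars.strip l).isEmpty)).map (fun l => l.length)
  if widths = [] then block
  else block.map (fun l => pvPadLineB l ((PySem.List.max? widths (fun x => x)).getD 0))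

-- the body of Source B's `for line in text.split('\n')` loop
def pvStepB (st : List (List Char) × Option (List (List Char))) (l : List Char) :
    List (List Char) × Option (List (List Char)) :=
  if pvFence l then
    match st.2 with
    | none => (st.1 ++ [l], some [])
    | some b => (st.1 ++ pvPadBlockB b ++ [l], none)
  else
    match st.2 with
    | none => (st.1 ++ [l], none)
    | some b => (st.1, some (b ++ [l]))

-- Source B's trailing `if block is not None: out.extend(pad_block(block))`
def pvFinishB (st : List (List Char) × Option (List (List Char))) : List (List Char) :=
  match st.2 with
  | none => st.1
  | some b => st.1 ++ pvPadBlockB b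

def normalize_code_blocks_alt (text : String) : String :=
  let lines := (PySem.Chars.split? text.toList ['\n']).getD []   -- separator ≠ '' : never none
  String.ofList (PySem.Chars.join ['\n'] (pvFinishB (lines.foldl pvStepB ([], none))))

-- ===== PRECONDITION & SPEC =====
def Spec_normalize_code_blocks (text : String) (out : String) : Prop := out = normalize_code_blocks_alt text
instance (text : String) (out : String) : Decidable (Spec_normalize_code_blocks text out) := by unfold Spec_normalize_code_blocks; infer_instance

-- ===== CLAIM (what is proved, stated in full; the proofs are below) =====
def Claim_equal_normalize_code_blocks : Prop := ∀ (text : String), Dom_normalize_code_blocks text → Spec_normalize_code_blocks text (normalize_code_blocks text)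

-- ===== LEMMAS AND PROOFS =====

theorem pvGetc_append_left (cs ds : List Char) (i : Int) (h0 : 0 ≤ i) (h1 : i < cs.length) :
    pvGetc (cs ++ ds) i = pvGetc cs i := by
  have hi : i = ((i.toNat : Nat) : Int) := by omega
  rw [pvGetc, pvGetc, hi, PySem.List.pyGet?_natCast, PySem.List.pyGet?_natCast,
    List.getElem?_append_left (by omega)]

theorem pvGetc_append_len (cs : List Char) (c : Char) (ds : List Char) :
    pvGetc (cs ++ c :: ds) (cs.length : Int) = c := by
  rw [pvGetc, PySem.List.pyGet?_natCast]
  simp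

theorem pvCountSp_append (cs ds : List Char) (i : Int) (h : i < (cs.length : Int)) :
    pvCountSp (cs ++ ds) i = pvCountSp cs i := by
  revert h
  fun_induction pvCountSp cs i with
  | case1 i h ih =>
      intro hlen
      conv_lhs => rw [pvCountSp.eq_def]
      rw [dif_pos ⟨h.1, by rw [pvGetc_append_left cs ds i h.1 (by omega)]; exact h.2⟩]
      rw [ih (by omega)]
  | case2 i h =>
      intro hlen
      conv_lhs => rw [pvCountSp.eq_def]
      by_cases h0 : 0 ≤ i
      · rw [dif_neg (fun hh => h ⟨hh.1, by
          rw [← pvGetc_append_left cs ds i hh.1 (by omega)]; exact hh.2⟩)]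
      · rw [dif_neg (fun hh => h0 hh.1)]

theorem pvFbtLoop_append (cs ds : List Char) (last i : Int) (h : i < (cs.length : Int)) :
    pvFbtLoop (cs ++ ds) last i = pvFbtLoop cs last i := by
  revert h
  fun_induction pvFbtLoop cs last i with
  | case1 last i h hc ih =>
      intro hlen
      obtain ⟨hc1, hc2, hc3, hc4⟩ := hc
      have hsnd := pvCountSp_snd cs i
      have hcs := pvCountSp_append cs ds i (by omega)
      conv_lhs => rw [pvFbtLoop.eq_def]
      rw [dif_pos h, hcs, pvGetc_append_left cs ds _ hc3 (by omega),
        dif_pos ⟨hc1, hc2, hc3, hc4⟩]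
      exact ih (by omega)
  | case2 last i h hc =>
      intro hlen
      have hsnd := pvCountSp_snd cs i
      have hcs := pvCountSp_append cs ds i (by omega)
      conv_lhs => rw [pvFbtLoop.eq_def]
      rw [dif_pos h, hcs]
      by_cases h0 : 0 ≤ (pvCountSp cs i).2
      · rw [pvGetc_append_left cs ds _ h0 (by omega), dif_neg hc]
      · rw [dif_neg (fun hh => h0 hh.2.2.1)]
  | case3 last i h =>
      intro hlen
      conv_lhs => rw [pvFbtLoop.eq_def]
      rw [dif_neg h]

theorem pvSkipSp_eq_countSp (cs : List Char) (i : Int) :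
    pvSkipSp cs i = (pvCountSp cs i).2 := by
  fun_induction pvSkipSp cs i with
  | case1 i h ih =>
      rw [ih]
      conv_rhs => rw [pvCountSp.eq_def]
      rw [dif_pos h]
  | case2 i h =>
      conv_rhs => rw [pvCountSp.eq_def]
      rw [dif_neg h]


theorem pvFbtLoop_le (cs : List Char) (last i : Int) (h : i < last) :
    pvFbtLoop cs last i ≤ last := by
  revert h
  fun_induction pvFbtLoop cs last i with
  | case1 last i h hc ih =>
      intro hlt
      obtain ⟨hc1, hc2, hc3, hc4⟩ := hc
      have hsnd := pvCountSp_snd cs i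
      have h1 : (1 : Int) ≤ ((pvCountSp cs i).1 : Int) := by exact_mod_cast hc1
      exact le_trans (ih (by omega)) (by omega)
  | case2 last i h hc =>
      intro hlt
      exact le_refl last
  | case3 last i h =>
      intro hlt
      exact le_refl last

theorem pvFbtState_append (cs : List Char) (c : Char) :
    (PySem.List.enumerate (cs ++ [c]) 0).foldl pvFbtStep (-1, none) =
      pvFbtStep ((PySem.List.enumerate cs 0).foldl pvFbtStep (-1, none)) ((cs.length : Int), c) := by
  rw [PySem.List.enumerate_append, List.foldl_append]
  simp [PySem.List.enumerate_cons, PySem.List.enumerate_nil]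

theorem pvCountSp_last_of_ne (cs : List Char) (c : Char) (hc : c ≠ ' ') :
    pvCountSp (cs ++ [c]) (cs.length : Int) = (0, (cs.length : Int)) := by
  rw [pvCountSp.eq_def, dif_neg]
  intro hh
  exact hc (by rw [← pvGetc_append_len cs c []]; exact hh.2)

theorem pvCountSp_last_of_sp (cs : List Char) :
    pvCountSp (cs ++ [' ']) (cs.length : Int) =
      ((pvCountSp cs ((cs.length : Int) - 1)).1 + 1, (pvCountSp cs ((cs.length : Int) - 1)).2) := by
  rw [pvCountSp.eq_def, dif_pos ⟨by omega, by rw [pvGetc_append_len cs ' ' []]⟩,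
    pvCountSp_append cs [' '] _ (by omega)]

-- invariant of B's forward state machine, stated in terms of A's primitives
theorem pvFbt_invariant (cs : List Char) :
    (match (PySem.List.enumerate cs 0).foldl pvFbtStep (-1, none) with
     | (_, none) =>
        ¬ (0 ≤ (pvCountSp cs ((cs.length : Int) - 1)).2 ∧
           pvIsBorder (pvGetc cs (pvCountSp cs ((cs.length : Int) - 1)).2) = true)
     | (s, some g) =>
        pvCountSp cs ((cs.length : Int) - 1) = (g, (cs.length : Int) - 1 - g) ∧
        0 ≤ (cs.length : Int) - 1 - g ∧
        pvIsBorder (pvGetc cs ((cs.length : Int) - 1 - g)) = true ∧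
        s = pvFbtLoop cs ((cs.length : Int) - 1 - g) ((cs.length : Int) - 1 - g - 1) : Prop) := by
  induction cs using List.reverseRecOn with
  | nil =>
      simp only [PySem.List.enumerate_nil, List.foldl_nil]
      intro hh
      rw [pvCountSp.eq_def, dif_neg (by simp)] at hh
      simp at hh
  | append_singleton cs c ih =>
      rw [pvFbtState_append]
      rcases hS : (PySem.List.enumerate cs 0).foldl pvFbtStep (-1, none) with ⟨s, gap⟩
      rw [hS] at ih
      have hlen : ((cs ++ [c]).length : Int) = (cs.length : Int) + 1 := by
        simp
      by_cases hb : pvIsBorder c = true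
      · -- appended char is a border character
        have hcne : c ≠ ' ' := by
          have h2 : c = '|' ∨ c = '+' := by simpa [pvIsBorder] using hb
          rcases h2 with rfl | rfl <;> decide
        have hcount := pvCountSp_last_of_ne cs c hcne
        have hgetc : pvGetc (cs ++ [c]) (cs.length : Int) = c := pvGetc_append_len cs c []
        -- evaluate A's loop one step on the extended string
        have hloop : ∀ s',
            (match gap with
              | some g => if 1 ≤ g ∧ g ≤ 4 then s else (cs.length : Int)
              | none => (cs.length : Int)) = s' →
            s' = pvFbtLoop (cs ++ [c]) (cs.length : Int) ((cs.length : Int) - 1) := by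
          intro s' hs'
          cases gap with
          | none =>
              subst hs'
              rw [pvFbtLoop.eq_def]
              by_cases h0 : (0 : Int) ≤ (cs.length : Int) - 1
              · rw [dif_pos h0, pvCountSp_append cs [c] _ (by omega)]
                have hsnd := pvCountSp_snd cs ((cs.length : Int) - 1)
                rw [dif_neg]
                intro hh
                by_cases hr : (0 : Int) ≤ (pvCountSp cs ((cs.length : Int) - 1)).2
                · exact ih ⟨hr, by
                    rw [← pvGetc_append_left cs [c] _ hr (by omega)]; exact hh.2.2.2⟩
                · exact hr hh.2.2.1
              · rw [dif_neg h0]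
          | some g =>
              obtain ⟨ihc, ihpos, ihb, ihs⟩ := ih
              have hsnd := pvCountSp_snd cs ((cs.length : Int) - 1)
              rw [pvFbtLoop.eq_def, dif_pos (by omega : (0:Int) ≤ (cs.length : Int) - 1),
                pvCountSp_append cs [c] _ (by omega), ihc]
              by_cases hg : 1 ≤ g ∧ g ≤ 4
              · rw [dif_pos ⟨hg.1, hg.2, by omega, by
                  rw [pvGetc_append_left cs [c] _ (by omega) (by omega)]; exact ihb⟩]
                rw [pvFbtLoop_append cs [c] _ _ (by omega), ← ihs]
                simp only [if_pos hg] at hs'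
                exact hs'.symm
              · rw [dif_neg (by intro hh; exact hg ⟨hh.1, hh.2.1⟩)]
                simp only [if_neg hg] at hs'
                exact hs'.symm
        simp only [pvFbtStep, hb, if_pos]
        cases gap with
        | none =>
            refine ⟨?_, ?_, ?_, ?_⟩
            · rw [hlen]; simpa using hcount
            · omega
            · rw [hlen]; simpa [hgetc] using hb
            · rw [hlen]
              simpa using hloop _ rfl
        | some g =>
            refine ⟨?_, ?_, ?_, ?_⟩
            · rw [hlen]; simpa using hcount
            · omega
            · rw [hlen]; simpa [hgetc] using hb
            · rw [hlen]
              simpa using hloop _ rfl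
      · by_cases hsp : c = ' '
        · -- appended char is a space
          subst hsp
          have hcount := pvCountSp_last_of_sp cs
          simp only [pvFbtStep, hb, Bool.false_eq_true, if_false]
          cases gap with
          | none =>
              simp only [Option.map_none]
              intro hh
              have hsnd := pvCountSp_snd cs ((cs.length : Int) - 1)
              rw [hlen] at hh
              have h2 : ((cs.length : Int) + 1 - 1) = (cs.length : Int) := by omega
              rw [h2, hcount] at hh
              by_cases hr : (0 : Int) ≤ (pvCountSp cs ((cs.length : Int) - 1)).2
              · exact ih ⟨hr, by
                  rw [← pvGetc_append_left cs [' '] _ hr (by omega)]; exact hh.2⟩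
              · exact hr hh.1
          | some g =>
              obtain ⟨ihc, ihpos, ihb, ihs⟩ := ih
              simp only [Option.map_some]
              have h2 : ((cs ++ [' ']).length : Int) - 1 = (cs.length : Int) := by
                rw [hlen]; omega
              refine ⟨?_, ?_, ?_, ?_⟩
              · rw [h2, hcount, ihc]
                have : (cs.length : Int) - (g + 1 : Nat) = (cs.length : Int) - 1 - g := by
                  push_cast; omega
                rw [this]
              · push_cast; omega
              · have : ((cs ++ [' ']).length : Int) - 1 - (g + 1 : Nat) = (cs.length : Int) - 1 - g := by
                  rw [hlen]; push_cast; omega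
                rw [this, pvGetc_append_left cs [' '] _ (by omega) (by omega)]
                exact ihb
              · have : ((cs ++ [' ']).length : Int) - 1 - (g + 1 : Nat) = (cs.length : Int) - 1 - g := by
                  rw [hlen]; push_cast; omega
                rw [this, pvFbtLoop_append cs [' '] _ _ (by omega)]
                exact ihs
        · -- appended char breaks any chain
          have hcount := pvCountSp_last_of_ne cs c hsp
          simp only [pvFbtStep, hb, Bool.false_eq_true, if_false, if_neg hsp]
          intro hh
          rw [hlen] at hh
          have h2 : ((cs.length : Int) + 1 - 1) = (cs.length : Int) := by omega
          rw [h2, hcount] at hh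
          rw [pvGetc_append_len cs c []] at hh
          rw [hh.2] at hb
          exact hb rfl

theorem pvFbt_eq (cs : List Char) : pvFbtA cs = pvFbtB cs := by
  have hinv := pvFbt_invariant cs
  have hskip := pvSkipSp_eq_countSp cs ((cs.length : Int) - 1)
  rw [pvFbtA, pvFbtB]
  rcases hS : (PySem.List.enumerate cs 0).foldl pvFbtStep (-1, none) with ⟨s, gap⟩
  rw [hS] at hinv
  cases gap with
  | none =>
      simp only at hinv ⊢
      rw [if_pos]
      rw [hskip]
      by_cases h0 : (0 : Int) ≤ (pvCountSp cs ((cs.length : Int) - 1)).2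
      · right
        intro hbord
        exact hinv ⟨h0, hbord⟩
      · left; omega
  | some g =>
      obtain ⟨ihc, ihpos, ihb, ihs⟩ := hinv
      simp only
      rw [if_neg, hskip, ihc]
      · exact ihs.symm
      · rw [hskip, ihc]
        simp only [not_or, not_lt, not_not]
        exact ⟨by omega, ihb⟩

theorem pvFbtA_le (cs : List Char) : pvFbtA cs ≤ (cs.length : Int) - 1 := by
  have hskip := pvSkipSp_eq_countSp cs ((cs.length : Int) - 1)
  have hsnd := pvCountSp_snd cs ((cs.length : Int) - 1)
  rw [pvFbtA]
  split_ifs with hg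
  · omega
  · exact le_trans (pvFbtLoop_le cs _ _ (by omega)) (by omega)

theorem pvEndswith_singleton (s : List Char) (c : Char) :
    PySem.Chars.endswith s [c] =
      (match s.getLast? with | some d => d == c | none => false) := by
  rcases hL : s.getLast? with _ | d
  · rw [List.getLast?_eq_none_iff] at hL
    subst hL
    simp only
    rw [Bool.eq_false_iff]
    intro hE
    have := (PySem.Chars.endswith_iff _ _).mp hE
    simp at this
  · obtain ⟨l', rfl⟩ := List.getLast?_eq_some_iff.mp hL
    simp only
    by_cases hdc : d = c
    · subst hdc
      rw [(PySem.Chars.endswith_iff _ _).mpr ⟨l', rfl⟩]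
      simp
    · have hF : PySem.Chars.endswith (l' ++ [d]) [c] = false := by
        rw [Bool.eq_false_iff]
        intro hE
        obtain ⟨t, ht⟩ := (PySem.Chars.endswith_iff _ _).mp hE
        have := congrArg List.getLast? ht
        simp at this
        exact hdc this.symm
      rw [hF]
      simp [hdc]

theorem pvPadStepA_eq (m : Nat) (result : List (List Char)) (l : List Char) :
    pvPadStepA m result l = result ++ [pvPadLineB l m] := by
  rw [pvPadStepA, pvPadLineB]
  by_cases h1 : ((PySem.Chars.strip l).isEmpty || decide (m ≤ l.length)) = true
  · rw [if_pos h1, if_pos h1]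
  · rw [if_neg h1, if_neg h1]
    dsimp only
    rw [← pvFbt_eq (PySem.Chars.rstrip l)]
    by_cases h2 : (0 : Int) < pvFbtA (PySem.Chars.rstrip l)
    · rw [if_pos h2, if_pos h2]
      have hle := pvFbtA_le (PySem.Chars.rstrip l)
      have hnon : PySem.List.slice (PySem.Chars.rstrip l) none
          (some (pvFbtA (PySem.Chars.rstrip l))) ≠ [] := by
        rw [PySem.List.slice_to _ (by omega), Ne, List.take_eq_nil_iff]
        refine not_or.mpr ⟨by omega, fun hnil => ?_⟩
        rw [hnil] at hle h2
        simp at hle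
        omega
      rcases hL : (PySem.List.slice (PySem.Chars.rstrip l) none
          (some (pvFbtA (PySem.Chars.rstrip l)))).getLast? with _ | d
      · exact absurd (List.getLast?_eq_none_iff.mp hL) hnon
      · rw [pvEndswith_singleton, pvEndswith_singleton, hL, PySem.List.pyGet?_neg_one, hL]
        simp only [Option.getD_some]
        by_cases hd : d = '-'
        · subst hd; simp
        · by_cases he : d = '='
          · subst he; simp
          · simp [hd, he]
    · rw [if_neg h2, if_neg h2]
      rw [pvEndswith_singleton, pvEndswith_singleton, PySem.List.pyGet?_neg_one]
      rcases hL : (PySem.Chars.rstrip l).getLast? with _ | d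
      · simp
      · by_cases hp : d = '|'
        · subst hp; simp [pvIsBorder]
        · by_cases hq : d = '+'
          · subst hq; simp [pvIsBorder]
          · simp [pvIsBorder, hp, hq]

theorem pvPadBlock_eq (block : List (List Char)) : pvPadBlockA block = pvPadBlockB block := by
  rw [pvPadBlockA, pvPadBlockB]
  by_cases hW : block.filter (fun l => !(PySem.Chars.strip l).isEmpty) = []
  · rw [if_pos hW, if_pos (by rw [hW]; rfl)]
  · rw [if_neg hW, if_neg (by simpa using hW)]
    generalize ((PySem.List.max?
      ((block.filter (fun l => !(PySem.Chars.strip l).isEmpty)).map (fun l => l.length))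
      (fun x => x)).getD 0) = M
    suffices h : ∀ (bl acc : List (List Char)),
        List.foldl (pvPadStepA M) acc bl = acc ++ bl.map (fun l => pvPadLineB l M) by
      simpa using h block []
    intro bl
    induction bl with
    | nil => intro acc; simp
    | cons x t ihb => intro acc; rw [List.foldl_cons, pvPadStepA_eq, ihb]; simp

theorem pvNorm_eq (lines : List (List Char)) :
    (∀ out, pvFinishB (lines.foldl pvStepB (out, none)) = out ++ pvOuterA lines) ∧
    (∀ out b, pvFinishB (lines.foldl pvStepB (out, some b)) = out ++ pvInnerA lines b) := by
  induction lines with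
  | nil =>
      refine ⟨fun out => ?_, fun out b => ?_⟩
      · simp [pvFinishB, pvOuterA]
      · simp [pvFinishB, pvInnerA, pvPadBlock_eq]
  | cons l rest ih =>
      refine ⟨fun out => ?_, fun out b => ?_⟩
      · rw [List.foldl_cons]
        by_cases hf : pvFence l = true
        · rw [show pvStepB (out, none) l = (out ++ [l], some []) by simp [pvStepB, hf]]
          rw [ih.2 (out ++ [l]) []]
          simp [pvOuterA, hf]
        · rw [show pvStepB (out, none) l = (out ++ [l], none) by simp [pvStepB, hf]]
          rw [ih.1 (out ++ [l])]
          simp [pvOuterA, hf]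
      · rw [List.foldl_cons]
        by_cases hf : pvFence l = true
        · rw [show pvStepB (out, some b) l = (out ++ pvPadBlockB b ++ [l], none) by
            simp [pvStepB, hf]]
          rw [ih.1 (out ++ pvPadBlockB b ++ [l])]
          simp [pvInnerA, hf, pvPadBlock_eq]
        · rw [show pvStepB (out, some b) l = (out, some (b ++ [l])) by simp [pvStepB, hf]]
          rw [ih.2 out (b ++ [l])]
          simp [pvInnerA, hf]

-- ===== VERDICT (by name: the statement is the Claim_ definition above) =====
theorem normalize_code_blocks_spec : Claim_equal_normalize_code_blocks := by
  intro text _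
  unfold Spec_normalize_code_blocks normalize_code_blocks normalize_code_blocks_alt
  have h := (pvNorm_eq ((PySem.Chars.split? text.toList ['\n']).getD [])).1 []
  simp [h]
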